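-- pv_equiv track=rewrite | github.com/Francisco-roman1965/reforzamientos-francisco-roman | refor3-listas-e6.py | reorganizar_lista_invitados
-- ===== SOURCE A (Python) =====
-- def reorganizar_lista_invitados(guests):
--     """
--     Reorganiza la lista de invitados: primero los que tienen número impar de letras,
--     manteniendo el orden de llegada, luego los que tienen número par de letras.
--
--     Args:
--         guests (list): Lista original de invitados
--
--     Returns:
--         list: Lista reorganizada
--     """
--     # Separar en dos listas: impares y pares
--     impares = []
--     pares = []
--
--     for invitado in guests:
--         # Contar letras (eliminando espacios si los hubiera)
--         cantidad_letras = len(invitado.replace(" ", ""))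
--
--         if cantidad_letras % 2 == 1:  # Número impar de letras
--             impares.append(invitado)
--         else:  # Número par de letras
--             pares.append(invitado)
--
--     # Combinar las listas: primero impares, luego pares
--     return impares + pares
-- ===== SOURCE B (Python) =====
-- def reorganizar_lista_invitados(guests):
--     """
--     Reorganiza la lista de invitados: primero los que tienen número impar de letras,
--     manteniendo el orden de llegada, luego los que tienen número par de letras.
--     """
--     # Stable sort on the boolean parity key: odd letter-counts map to False (sort
--     # first, arrival order kept), even to True (sort last, arrival order kept).
--     return sorted(guests, key=lambda g: len(g.replace(" ", "")) % 2 == 0)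
-- ===== Notes on version B (the rewrite author's own statement) =====
-- stated objective: idiomatic
-- what changed: Replaces the two-accumulator partition loop plus concatenation with a single stable sort over the boolean parity key (odd=False first, even=True last).
import Mathlib
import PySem

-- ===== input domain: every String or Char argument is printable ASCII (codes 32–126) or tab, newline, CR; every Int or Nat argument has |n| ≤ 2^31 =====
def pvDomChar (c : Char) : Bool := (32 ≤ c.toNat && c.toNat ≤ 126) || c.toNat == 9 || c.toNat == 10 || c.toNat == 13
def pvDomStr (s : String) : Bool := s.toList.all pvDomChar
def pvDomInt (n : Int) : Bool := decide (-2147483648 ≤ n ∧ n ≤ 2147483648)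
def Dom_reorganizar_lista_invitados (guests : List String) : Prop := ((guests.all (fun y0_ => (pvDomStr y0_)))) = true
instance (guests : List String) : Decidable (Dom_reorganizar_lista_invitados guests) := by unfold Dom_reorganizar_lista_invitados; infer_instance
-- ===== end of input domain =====

-- B replaces A's partition-into-two-lists-and-concatenate loop with one stable sort
-- over the boolean parity key (odd letter-count sorts first); same return value.

-- ===== PORT A =====
-- one loop step: append the guest to impares (odd letter count) or pares (even)
def pvStepA (acc : List String × List String) (invitado : String) : List String × List String :=
  if PySem.Int.mod (PySem.Str.len (PySem.Str.replace invitado " " "")) 2 == 1 then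
    (acc.1 ++ [invitado], acc.2)
  else (acc.1, acc.2 ++ [invitado])

def reorganizar_lista_invitados (guests : List String) : List String :=
  let p := guests.foldl pvStepA ([], [])
  p.1 ++ p.2

-- ===== PORT B =====
-- the sort key of Source B: len(g.replace(" ", "")) % 2 == 0
def pvKeyB (g : String) : Bool := PySem.Int.mod (PySem.Str.len (PySem.Str.replace g " " "")) 2 == 0

def reorganizar_lista_invitados_alt (guests : List String) : List String :=
  PySem.List.sorted guests pvKeyB false

-- ===== PRECONDITION & SPEC =====
def Spec_reorganizar_lista_invitados (guests : List String) (out : List String) : Prop := out = reorganizar_lista_invitados_alt guests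
instance (guests : List String) (out : List String) : Decidable (Spec_reorganizar_lista_invitados guests out) := by unfold Spec_reorganizar_lista_invitados; infer_instance

-- ===== CLAIM (what is proved, stated in full; the proofs are below) =====
def Claim_equal_reorganizar_lista_invitados : Prop := ∀ (guests : List String), Dom_reorganizar_lista_invitados guests → Spec_reorganizar_lista_invitados guests (reorganizar_lista_invitados guests)

-- ===== LEMMAS AND PROOFS =====

-- the comparison used by the stable insertion sort with key pvKeyB
def pvBef (a b : String) : Bool := decide (pvKeyB a < pvKeyB b)

-- A's branch test is the negation of B's key (mod 2 of a value is 0 or 1)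
theorem pvCond_eq_not_key (g : String) :
    (PySem.Int.mod (PySem.Str.len (PySem.Str.replace g " " "")) 2 == 1) = !(pvKeyB g) := by
  unfold pvKeyB PySem.Int.mod
  have hfmod : ∀ a : Int, a.fmod 2 = a % 2 := fun a => by simp [Int.fmod_eq_emod]
  rw [hfmod]
  rcases Int.emod_two_eq (PySem.Str.len (PySem.Str.replace g " " "")) with h | h <;>
    rw [h] <;> decide

-- an even-keyed element is inserted at the very end
theorem pvInsert_even (x : String) (l : List String) (hx : pvKeyB x = true) :
    PySem.List.insertBy pvBef x l = l ++ [x] := by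
  apply PySem.List.insertBy_of_forall_not_before
  intro y _
  cases hy : pvKeyB y <;> simp [pvBef, hx, hy]

-- an odd-keyed element is inserted after all odd-keyed and before all even-keyed ones
theorem pvInsert_odd (x : String) (O E : List String) (hx : pvKeyB x = false)
    (hO : ∀ y ∈ O, pvKeyB y = false) (hE : ∀ y ∈ E, pvKeyB y = true) :
    PySem.List.insertBy pvBef x (O ++ E) = (O ++ [x]) ++ E := by
  induction O with
  | nil =>
    cases E with
    | nil => simp [PySem.List.insertBy]
    | cons e es =>
      have he : pvKeyB e = true := hE e (by simp)
      simp [PySem.List.insertBy, pvBef, hx, he]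
  | cons y O' ih =>
    have hy : pvKeyB y = false := hO y (by simp)
    have := ih (fun z hz => hO z (by simp [hz]))
    simp [PySem.List.insertBy, pvBef, hx, hy, this]

-- loop invariant: A's fold from (O, E) flattens to the insertion-sort fold from O ++ E
theorem pvLoop_eq (xs : List String) : ∀ (O E : List String),
    (∀ y ∈ O, pvKeyB y = false) → (∀ y ∈ E, pvKeyB y = true) →
    (xs.foldl pvStepA (O, E)).1 ++ (xs.foldl pvStepA (O, E)).2
      = xs.foldl (fun acc x => PySem.List.insertBy pvBef x acc) (O ++ E) := by
  induction xs with
  | nil => intro O E _ _; simp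
  | cons x xs ih =>
    intro O E hO hE
    simp only [List.foldl_cons]
    cases hx : pvKeyB x with
    | false =>
      have hstep : pvStepA (O, E) x = (O ++ [x], E) := by
        unfold pvStepA; rw [pvCond_eq_not_key, hx]; simp
      rw [hstep, pvInsert_odd x O E hx hO hE]
      exact ih (O ++ [x]) E
        (by intro y hy; rcases List.mem_append.1 hy with h | h
            · exact hO y h
            · simp at h; simpa [h] using hx) hE
    | true =>
      have hstep : pvStepA (O, E) x = (O, E ++ [x]) := by
        unfold pvStepA; rw [pvCond_eq_not_key, hx]; simp
      rw [hstep, pvInsert_even x (O ++ E) hx, List.append_assoc]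
      exact ih O (E ++ [x]) hO
        (by intro y hy; rcases List.mem_append.1 hy with h | h
            · exact hE y h
            · simp at h; simpa [h] using hx)

-- ===== VERDICT (by name: the statement is the Claim_ definition above) =====
theorem reorganizar_lista_invitados_spec : Claim_equal_reorganizar_lista_invitados := by
  intro guests _
  unfold Spec_reorganizar_lista_invitados reorganizar_lista_invitados reorganizar_lista_invitados_alt
  rw [PySem.List.sorted_eq_foldl_insertBy]
  simpa using pvLoop_eq guests [] [] (by simp) (by simp)
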